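-- pv_equiv track=rewrite | github.com/DragonOfPython/Pythonhomeworks | lesson-4/homework/underscore1.py | underscore
-- ===== SOURCE A (Python) =====
-- def underscore(stringi):
--     len1 = len(stringi)
--     vowels = "ieoua"
--     newstring = ''
--     underscore = []
--     for i in range(len1):
--         underscore.append(stringi[i])
--
--         if (i+1) % 3 == 0 and i != len1 - 1:
--             if stringi[i] not in vowels:
--                 underscore.append("_")
--             elif i < len1 - 1 and stringi[i] not in vowels:
--                     underscore.append("_")
--             elif stringi[:i+1] == stringi[:i]:
--                 underscore.append("_")
--
--     result = newstring.join(underscore)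
--
--     return result
-- ===== SOURCE B (Python) =====
-- def underscore(stringi):
--     # Chunked rewrite: walk the string in strides of 3, emitting each 3-slice and
--     # an underscore after any complete triple that is not string-final and whose
--     # last character is not a vowel.
--     n = len(stringi)
--     parts = []
--     i = 0
--     while i < n:
--         parts.append(stringi[i:i+3])
--         if i + 3 < n and stringi[i+2] not in "ieoua":
--             parts.append("_")
--         i += 3
--     return "".join(parts)
-- ===== Notes on version B (the rewrite author's own statement) =====
-- stated objective: faster
-- what changed: Replaces A's per-character index loop (with its three-way conditional and per-index string slicing) by a stride-3 chunked scan that emits each 3-slice and a conditional underscore, joined at the end.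
import Mathlib
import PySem

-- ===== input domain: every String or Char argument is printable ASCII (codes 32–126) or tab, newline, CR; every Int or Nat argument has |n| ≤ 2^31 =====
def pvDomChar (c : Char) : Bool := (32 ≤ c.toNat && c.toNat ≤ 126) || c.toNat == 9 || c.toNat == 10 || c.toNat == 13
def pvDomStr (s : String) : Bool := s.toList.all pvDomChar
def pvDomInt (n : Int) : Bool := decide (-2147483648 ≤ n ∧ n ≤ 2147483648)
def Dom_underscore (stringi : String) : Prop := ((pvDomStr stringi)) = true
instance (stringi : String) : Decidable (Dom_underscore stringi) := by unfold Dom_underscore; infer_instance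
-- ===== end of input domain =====

-- B replaces A's per-character index loop by a stride-3 chunked scan (3-slices plus a conditional
-- underscore); the return values are proved equal on all strings.

-- ===== PORT A =====
-- the body of A's for-loop (i is the loop index, acc is A's 'underscore' list so far)
def underscoreStepA (cs : List Char) (len1 : Int) (acc : List Char) (i : Int) : List Char :=
  let acc := acc ++ [PySem.List.pyGetD cs i ' ']
  if PySem.Int.mod (i + 1) 3 = 0 ∧ i ≠ len1 - 1 then
    if PySem.List.pyGetD cs i ' ' ∉ "ieoua".toList then acc ++ ['_']
    else if i < len1 - 1 ∧ PySem.List.pyGetD cs i ' ' ∉ "ieoua".toList then acc ++ ['_']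
    else if PySem.List.slice cs none (some (i + 1)) = PySem.List.slice cs none (some i) then
      acc ++ ['_']
    else acc
  else acc

def underscore (stringi : String) : String :=
  let cs := stringi.toList
  let len1 : Int := (cs.length : Int)
  let und : List Char := (PySem.List.pyRange 0 len1 1).foldl (underscoreStepA cs len1) []
  String.ofList und

-- ===== PORT B =====
-- B's while-loop: emit the 3-slice at i, then '_' when a complete non-final triple ends in a non-vowel
def underscoreGoB (cs : List Char) (n i : Int) : List (List Char) :=
  if _h : i < n then
    PySem.List.slice cs (some i) (some (i + 3)) ::
      (if i + 3 < n ∧ PySem.List.pyGetD cs (i + 2) ' ' ∉ "ieoua".toList then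
        ['_'] :: underscoreGoB cs n (i + 3)
      else underscoreGoB cs n (i + 3))
  else []
termination_by (n - i).toNat
decreasing_by all_goals omega


def underscore_alt (stringi : String) : String :=
  let cs := stringi.toList
  let n : Int := (cs.length : Int)
  String.ofList (underscoreGoB cs n 0).flatten

-- ===== PRECONDITION & SPEC =====
def Spec_underscore (stringi : String) (out : String) : Prop := out = underscore_alt stringi
instance (stringi : String) (out : String) : Decidable (Spec_underscore stringi out) := by unfold Spec_underscore; infer_instance

-- ===== CLAIM (what is proved, stated in full; the proofs are below) =====
def Claim_equal_underscore : Prop := ∀ (stringi : String), Dom_underscore stringi → Spec_underscore stringi (underscore stringi)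

-- ===== LEMMAS AND PROOFS =====

lemma stepA_skip (cs : List Char) (i : Int) (h0 : 0 ≤ i) (hiL : i < (cs.length : Int))
    (h1 : (i + 1) % 3 ≠ 0) (acc : List Char) :
    underscoreStepA cs (cs.length : Int) acc i = acc ++ [cs[i.toNat]] := by
  simp only [underscoreStepA, PySem.List.pyGetD_eq_getElem cs ' ' h0 hiL]
  rw [if_neg]
  intro hc
  exact h1 (by rw [← PySem.Int.mod_eq_emod_of_pos (a := i+1) (by omega)]; exact hc.1)

lemma stepA_mark (cs : List Char) (i : Int) (h0 : 0 ≤ i) (hiL : i < (cs.length : Int))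
    (h1 : (i + 1) % 3 = 0) (acc : List Char) :
    underscoreStepA cs (cs.length : Int) acc i =
      acc ++ [cs[i.toNat]] ++
        (if i + 1 < (cs.length : Int) ∧ cs[i.toNat] ∉ "ieoua".toList then ['_'] else []) := by
  simp only [underscoreStepA, PySem.List.pyGetD_eq_getElem cs ' ' h0 hiL]
  have hmod : PySem.Int.mod (i + 1) 3 = 0 := by
    rw [PySem.Int.mod_eq_emod_of_pos (by omega)]; exact h1
  by_cases hlast : i = (cs.length : Int) - 1
  · rw [if_neg (by intro hc; exact hc.2 hlast)]
    rw [if_neg (by intro hc; omega)]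
    simp
  · rw [if_pos ⟨hmod, hlast⟩]
    by_cases hv : cs[i.toNat] ∉ "ieoua".toList
    · rw [if_pos hv, if_pos (show i + 1 < (cs.length:Int) ∧ cs[i.toNat] ∉ "ieoua".toList from ⟨by omega, hv⟩)]
    · rw [if_neg hv, if_neg (by intro hc; exact hv hc.2), if_neg, if_neg (by intro hc; exact hv hc.2)]
      · simp
      · intro heq
        have := congrArg List.length heq
        rw [PySem.List.slice_to cs (show (0:Int) ≤ i + 1 by omega), PySem.List.slice_to cs h0] at this
        simp [List.length_take] at this
        omega

lemma goB_nil (cs : List Char) (n i : Int) (h : n ≤ i) : underscoreGoB cs n i = [] := by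
  rw [underscoreGoB, dif_neg (by omega)]

lemma underscore_main (cs : List Char) (d : Nat) :
    ∀ (j : Nat), cs.length - j ≤ d → j % 3 = 0 → ∀ (acc : List Char),
      (PySem.List.pyRange (j : Int) (cs.length : Int)).foldl (underscoreStepA cs (cs.length : Int)) acc
        = acc ++ (underscoreGoB cs (cs.length : Int) (j : Int)).flatten := by
  induction d with
  | zero =>
    intro j hle hj acc
    rw [PySem.List.pyRange_one_eq_nil (by omega), goB_nil cs _ _ (by omega)]
    simp
  | succ d ih =>
    intro j hle hj acc
    by_cases hjL : cs.length ≤ j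
    · rw [PySem.List.pyRange_one_eq_nil (by omega), goB_nil cs _ _ (by omega)]
      simp
    · have hjL : j < cs.length := by omega
      have h0 : (0:Int) ≤ (j:Int) := by omega
      have hjI : (j:Int) < (cs.length:Int) := by omega
      rw [PySem.List.pyRange_one_cons hjI, List.foldl_cons,
        stepA_skip cs (j:Int) h0 hjI (by omega)]
      rw [underscoreGoB, dif_pos hjI]
      have hdrop : cs.drop j = cs[j] :: cs.drop (j+1) := List.drop_eq_getElem_cons hjL
      by_cases hb : j + 1 = cs.length
      · -- one char left: no more indices, chunk is [cs[j]]
        rw [PySem.List.pyRange_one_eq_nil (by omega)]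
        rw [if_neg (by omega), goB_nil cs _ _ (by omega)]
        rw [show (j:Int)+3 = ((j+3:Nat):Int) from by push_cast; ring]
        rw [PySem.List.slice_toNat cs h0 (by omega)]
        simp only [Int.toNat_natCast]
        rw [hdrop, List.drop_eq_nil_of_le (by omega)]
        simp
      · by_cases hb2 : j + 2 = cs.length
        · -- two chars left
          have hj1L : j + 1 < cs.length := by omega
          rw [PySem.List.pyRange_one_cons (by omega : (j:Int)+1 < (cs.length:Int)), List.foldl_cons]
          rw [show (j:Int)+1 = ((j+1:Nat):Int) from by push_cast; ring]
          rw [stepA_skip cs ((j+1:Nat):Int) (by omega) (by omega) (by omega)]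
          rw [show (((j+1):Nat):Int)+1 = ((j+2:Nat):Int) from by push_cast; ring]
          rw [PySem.List.pyRange_one_eq_nil (by omega)]
          rw [if_neg (by omega), goB_nil cs _ _ (by omega)]
          rw [show (j:Int)+3 = ((j+3:Nat):Int) from by push_cast; ring]
          rw [PySem.List.slice_toNat cs h0 (by omega)]
          simp only [Int.toNat_natCast]
          rw [hdrop, List.drop_eq_getElem_cons hj1L, List.drop_eq_nil_of_le (by omega)]
          simp
        · -- a full triple ahead
          have hj1L : j + 1 < cs.length := by omega
          have hj2L : j + 2 < cs.length := by omega
          rw [PySem.List.pyRange_one_cons (by omega : (j:Int)+1 < (cs.length:Int)), List.foldl_cons]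
          rw [show (j:Int)+1 = ((j+1:Nat):Int) from by push_cast; ring]
          rw [stepA_skip cs ((j+1:Nat):Int) (by omega) (by omega) (by omega)]
          rw [show (((j+1):Nat):Int)+1 = ((j+2:Nat):Int) from by push_cast; ring]
          rw [PySem.List.pyRange_one_cons (by omega : ((j+2:Nat):Int) < (cs.length:Int)), List.foldl_cons]
          rw [stepA_mark cs ((j+2:Nat):Int) (by omega) (by omega) (by omega)]
          simp only [show (((j+2):Nat):Int)+1 = ((j+3:Nat):Int) from by push_cast; ring]
          rw [ih (j+3) (by omega) (by omega)]
          -- B side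
          rw [show (j:Int)+3 = ((j+3:Nat):Int) from by push_cast; ring]
          rw [show (j:Int)+2 = ((j+2:Nat):Int) from by push_cast; ring]
          rw [PySem.List.pyGetD_eq_getElem cs ' ' (by omega) (by omega)]
          rw [PySem.List.slice_toNat cs h0 (by omega)]
          simp only [Int.toNat_natCast]
          rw [show j + 3 - j = 3 from by omega]
          rw [hdrop, List.drop_eq_getElem_cons hj1L, List.drop_eq_getElem_cons hj2L,
            show ∀ (l : List Char) (a b c : Char), List.take 3 (a :: b :: c :: l) = [a, b, c] from
              fun l a b c => rfl]
          by_cases hcond : ((j+3:Nat):Int) < (cs.length:Int) ∧ cs[j+2] ∉ "ieoua".toList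
          · rw [if_pos hcond, if_pos hcond]
            simp
          · rw [if_neg hcond, if_neg hcond]
            simp

-- ===== VERDICT (by name: the statement is the Claim_ definition above) =====
theorem underscore_spec : Claim_equal_underscore := by
  intro s _
  unfold Spec_underscore underscore underscore_alt
  exact congrArg String.ofList (by simpa using underscore_main s.toList s.toList.length 0 (by omega) (by omega) [])
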